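-- pv_equiv track=rewrite | github.com/BertCalm/XO_OX-XOmnibus | Tools/xpn_velocity_zone_visualizer.py | find_gaps
-- ===== SOURCE A (Python) =====
-- def find_gaps(coverage: list[int]) -> list[tuple[int, int]]:
--     """Return list of (vel_start, vel_end) 1-based gap spans."""
--     gaps: list[tuple[int, int]] = []
--     in_gap = False
--     gap_start = 0
--     for i, c in enumerate(coverage):
--         vel = i + 1  # 1-based
--         if c == 0 and not in_gap:
--             in_gap = True
--             gap_start = vel
--         elif c > 0 and in_gap:
--             gaps.append((gap_start, vel - 1))
--             in_gap = False
--     if in_gap: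
--         gaps.append((gap_start, 128))
--     return gaps
-- ===== SOURCE B (Python) =====
-- def find_gaps(coverage: list[int]) -> list[tuple[int, int]]:
--     """Return list of (vel_start, vel_end) 1-based gap spans."""
--     pos = [i + 1 for i, c in enumerate(coverage) if c > 0]
--     zeros = [i + 1 for i, c in enumerate(coverage) if c == 0]
--     gaps: list[tuple[int, int]] = []
--     lo = 0
--     for hi in pos:
--         while zeros and zeros[0] <= lo:
--             zeros.pop(0)
--         if zeros and zeros[0] < hi:
--             gaps.append((zeros[0], hi - 1))
--         lo = hi
--     while zeros and zeros[0] <= lo: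
--         zeros.pop(0)
--     if zeros:
--         gaps.append((zeros[0], 128))
--     return gaps
-- ===== Notes on version B (the rewrite author's own statement) =====
-- stated objective: alternative
-- what changed: B precomputes the 1-based positions of positive and of zero entries and merges the two lists segment-by-segment with a two-pointer sweep, instead of A's per-element in_gap state-machine toggle.
import Mathlib
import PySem

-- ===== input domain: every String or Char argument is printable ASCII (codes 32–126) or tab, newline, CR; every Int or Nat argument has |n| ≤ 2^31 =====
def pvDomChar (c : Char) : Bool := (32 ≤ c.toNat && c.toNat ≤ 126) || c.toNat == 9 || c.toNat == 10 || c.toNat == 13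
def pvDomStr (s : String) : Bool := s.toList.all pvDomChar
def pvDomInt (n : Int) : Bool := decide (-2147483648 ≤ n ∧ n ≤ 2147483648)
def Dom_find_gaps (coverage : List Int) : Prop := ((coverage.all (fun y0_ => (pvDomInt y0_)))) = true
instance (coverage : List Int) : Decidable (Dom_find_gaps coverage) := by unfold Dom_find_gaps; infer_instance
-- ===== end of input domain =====

-- B replaces A's per-element in_gap toggle by precomputed positive/zero position lists
-- merged with a two-pointer segment sweep (objective: alternative; same cost).

-- ===== PORT A =====
-- the for-loop over enumerate(coverage) with state (gaps, in_gap, gap_start); i is the 0-based index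
def find_gaps_loop (l : List Int) (i : Int) (gaps : List (Int × Int)) (in_gap : Bool) (gap_start : Int) :
    List (Int × Int) × Bool × Int :=
  match l with
  | [] => (gaps, in_gap, gap_start)
  | c :: rest =>
    let vel := i + 1
    if c == 0 && !in_gap then find_gaps_loop rest (i + 1) gaps true vel
    else if decide (c > 0) && in_gap then find_gaps_loop rest (i + 1) (gaps ++ [(gap_start, vel - 1)]) false gap_start
    else find_gaps_loop rest (i + 1) gaps in_gap gap_start

def find_gaps (coverage : List Int) : List (Int × Int) :=
  let s := find_gaps_loop coverage 0 [] false 0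
  if s.2.1 then s.1 ++ [(s.2.2, 128)] else s.1

-- ===== PORT B =====
-- [i + 1 for i, c in enumerate(coverage) if c > 0], carrying the 1-based position v directly
def posList (l : List Int) (v : Int) : List Int :=
  match l with
  | [] => []
  | c :: r => if c > 0 then v :: posList r (v + 1) else posList r (v + 1)

-- [i + 1 for i, c in enumerate(coverage) if c == 0]
def zeroList (l : List Int) (v : Int) : List Int :=
  match l with
  | [] => []
  | c :: r => if c == 0 then v :: zeroList r (v + 1) else zeroList r (v + 1)

-- one iteration of B's for-loop; the inner while-pop-from-front is dropWhile
def bStep (st : List (Int × Int) × Int × List Int) (hi : Int) : List (Int × Int) × Int × List Int :=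
  let zs := st.2.2.dropWhile (fun z => decide (z ≤ st.2.1))
  match zs with
  | z :: _ => if z < hi then (st.1 ++ [(z, hi - 1)], hi, zs) else (st.1, hi, zs)
  | [] => (st.1, hi, zs)

def find_gaps_alt (coverage : List Int) : List (Int × Int) :=
  let pos := posList coverage 1
  let zeros := zeroList coverage 1
  let s := pos.foldl bStep ([], 0, zeros)
  match s.2.2.dropWhile (fun z => decide (z ≤ s.2.1)) with
  | z :: _ => s.1 ++ [(z, 128)]
  | [] => s.1

-- ===== PRECONDITION & SPEC =====
def Spec_find_gaps (coverage : List Int) (out : List (Int × Int)) : Prop := out = find_gaps_alt coverage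
instance (coverage : List Int) (out : List (Int × Int)) : Decidable (Spec_find_gaps coverage out) := by unfold Spec_find_gaps; infer_instance

-- ===== CLAIM (what is proved, stated in full; the proofs are below) =====
def Claim_equal_find_gaps : Prop := ∀ (coverage : List Int), Dom_find_gaps coverage → Spec_find_gaps coverage (find_gaps coverage)

-- ===== LEMMAS AND PROOFS =====

-- reference function: the gap spans of l, current 1-based position v, st = some g iff inside a gap started at g
def go (v : Int) (st : Option Int) (l : List Int) : List (Int × Int) :=
  match l, st with
  | [], none => []
  | [], some g => [(g, 128)]
  | c :: r, none => if c == 0 then go (v + 1) (some v) r else go (v + 1) none r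
  | c :: r, some g => if c > 0 then (g, v - 1) :: go (v + 1) none r else go (v + 1) (some g) r

def finA (s : List (Int × Int) × Bool × Int) : List (Int × Int) :=
  if s.2.1 then s.1 ++ [(s.2.2, 128)] else s.1

theorem lemmaA : ∀ (l : List Int) (i : Int) (gaps : List (Int × Int)) (b : Bool) (g : Int),
    finA (find_gaps_loop l i gaps b g) = gaps ++ go (i + 1) (if b then some g else none) l := by
  intro l
  induction l with
  | nil => intro i gaps b g; cases b <;> simp [find_gaps_loop, go, finA]
  | cons c r ih =>
    intro i gaps b g
    cases b with
    | false =>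
      by_cases hc : c = 0
      · simp [find_gaps_loop, go, hc, ih]
      · simp [find_gaps_loop, go, hc, ih]
    | true =>
      by_cases hp : c > 0
      · have hc : ¬ c = 0 := by omega
        simp [find_gaps_loop, go, hc, hp, ih]
      · by_cases hc : c = 0
        · simp [find_gaps_loop, go, hc, hp, ih]
        · simp [find_gaps_loop, go, hc, hp, ih]

theorem zeroList_ge : ∀ (l : List Int) (v z : Int), z ∈ zeroList l v → v ≤ z := by
  intro l
  induction l with
  | nil => intro v z h; simp [zeroList] at h
  | cons c r ih =>
    intro v z h
    by_cases hc : c = 0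
    · simp [zeroList, hc] at h
      rcases h with h | h
      · omega
      · have := ih (v + 1) z h; omega
    · simp [zeroList, hc] at h
      have := ih (v + 1) z h; omega

theorem dropWhile_pre : ∀ (pre : List Int) (zs : List Int) (lo : Int),
    (∀ z ∈ pre, z ≤ lo) → (∀ z ∈ zs.head?, lo < z) →
    (pre ++ zs).dropWhile (fun z => decide (z ≤ lo)) = zs := by
  intro pre
  induction pre with
  | nil =>
    intro zs lo _ hz
    cases zs with
    | nil => simp
    | cons z t =>
      have : lo < z := hz z rfl
      simp [List.dropWhile, show ¬ z ≤ lo by omega]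
  | cons p t ih =>
    intro zs lo hp hz
    have : p ≤ lo := hp p (by simp)
    simp only [List.cons_append, List.dropWhile]
    rw [decide_eq_true this]
    exact ih zs lo (fun z hzt => hp z (by simp [hzt])) hz

def finB (s : List (Int × Int) × Int × List Int) : List (Int × Int) :=
  match s.2.2.dropWhile (fun z => decide (z ≤ s.2.1)) with
  | z :: _ => s.1 ++ [(z, 128)]
  | [] => s.1

theorem headLt {l : List Int} {v lo : Int} (h : lo < v) :
    ∀ z ∈ (zeroList l v).head?, lo < z := by
  intro z hz
  cases hl : zeroList l v with
  | nil => rw [hl] at hz; simp at hz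
  | cons a t =>
    rw [hl] at hz; simp at hz
    have : v ≤ a := zeroList_ge l v a (by rw [hl]; simp)
    omega

mutual
theorem lemmaB1 : ∀ (l : List Int) (v lo : Int) (gaps : List (Int × Int)) (pre : List Int),
    (∀ z ∈ pre, z ≤ lo) → lo < v →
    finB ((posList l v).foldl bStep (gaps, lo, pre ++ zeroList l v)) = gaps ++ go v none l := by
  intro l
  match l with
  | [] =>
    intro v lo gaps pre hpre hlo
    simp only [posList, zeroList, List.foldl_nil, go]
    unfold finB
    simp only
    rw [dropWhile_pre pre [] lo hpre (by simp)]
    simp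
  | c :: r =>
    intro v lo gaps pre hpre hlo
    by_cases hp : c > 0
    · have hc : ¬ c = 0 := by omega
      rw [show posList (c :: r) v = v :: posList r (v + 1) by simp [posList, hp],
          show zeroList (c :: r) v = zeroList r (v + 1) by simp [zeroList, hc],
          show go v none (c :: r) = go (v + 1) none r by simp [go, hc],
          List.foldl_cons]
      have hdrop : (pre ++ zeroList r (v + 1)).dropWhile (fun z => decide (z ≤ lo)) = zeroList r (v + 1) :=
        dropWhile_pre _ _ _ hpre (headLt (by omega))
      have hstep : bStep (gaps, lo, pre ++ zeroList r (v + 1)) v = (gaps, v, zeroList r (v + 1)) := by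
        unfold bStep
        simp only [hdrop]
        cases hz : zeroList r (v + 1) with
        | nil => rfl
        | cons z t =>
          have hzv : v + 1 ≤ z := zeroList_ge r (v + 1) z (by rw [hz]; simp)
          dsimp only
          rw [if_neg (by omega)]
      rw [hstep]
      have := lemmaB1 r (v + 1) v gaps [] (by simp) (by omega)
      simpa using this
    · by_cases hc : c = 0
      · rw [show posList (c :: r) v = posList r (v + 1) by simp [posList, hp],
            show zeroList (c :: r) v = v :: zeroList r (v + 1) by simp [zeroList, hc],
            show go v none (c :: r) = go (v + 1) (some v) r by simp [go, hc]]
        have := lemmaB2 r (v + 1) lo gaps pre v [] hpre hlo (by omega) (by simp)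
        simpa using this
      · rw [show posList (c :: r) v = posList r (v + 1) by simp [posList, hp],
            show zeroList (c :: r) v = zeroList r (v + 1) by simp [zeroList, hc],
            show go v none (c :: r) = go (v + 1) none r by simp [go, hc]]
        exact lemmaB1 r (v + 1) lo gaps pre hpre (by omega)
termination_by l => (l.length, 0)

theorem lemmaB2 : ∀ (l : List Int) (v lo : Int) (gaps : List (Int × Int)) (pre : List Int) (g : Int) (mid : List Int),
    (∀ z ∈ pre, z ≤ lo) → lo < g → g < v → (∀ z ∈ mid, z < v) →
    finB ((posList l v).foldl bStep (gaps, lo, pre ++ g :: (mid ++ zeroList l v))) = gaps ++ go v (some g) l := by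
  intro l
  match l with
  | [] =>
    intro v lo gaps pre g mid hpre hlo hg hmid
    simp only [posList, zeroList, List.foldl_nil, go]
    unfold finB
    simp only [List.append_nil]
    rw [dropWhile_pre pre (g :: mid) lo hpre (by intro z hz; simp at hz; omega)]
  | c :: r =>
    intro v lo gaps pre g mid hpre hlo hg hmid
    by_cases hp : c > 0
    · have hc : ¬ c = 0 := by omega
      rw [show posList (c :: r) v = v :: posList r (v + 1) by simp [posList, hp],
          show zeroList (c :: r) v = zeroList r (v + 1) by simp [zeroList, hc],
          show go v (some g) (c :: r) = (g, v - 1) :: go (v + 1) none r by simp [go, hp],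
          List.foldl_cons]
      have hdrop : (pre ++ g :: (mid ++ zeroList r (v + 1))).dropWhile (fun z => decide (z ≤ lo))
          = g :: (mid ++ zeroList r (v + 1)) :=
        dropWhile_pre _ _ _ hpre (by intro z hz; simp at hz; omega)
      have hstep : bStep (gaps, lo, pre ++ g :: (mid ++ zeroList r (v + 1))) v
          = (gaps ++ [(g, v - 1)], v, g :: (mid ++ zeroList r (v + 1))) := by
        unfold bStep
        simp only [hdrop]
        rw [if_pos hg]
      rw [hstep]
      have := lemmaB1 r (v + 1) v (gaps ++ [(g, v - 1)]) (g :: mid)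
        (by
          intro z hz
          simp at hz
          rcases hz with h | h
          · omega
          · have := hmid z h; omega)
        (by omega)
      simp only [List.cons_append] at this ⊢
      rw [this]
      simp
    · by_cases hc : c = 0
      · rw [show posList (c :: r) v = posList r (v + 1) by simp [posList, hp],
            show zeroList (c :: r) v = v :: zeroList r (v + 1) by simp [zeroList, hc],
            show go v (some g) (c :: r) = go (v + 1) (some g) r by simp [go, hp]]
        have := lemmaB2 r (v + 1) lo gaps pre g (mid ++ [v]) hpre hlo (by omega)
          (by
            intro z hz
            simp at hz
            rcases hz with h | h
            · have := hmid z h; omega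
            · omega)
        simpa using this
      · rw [show posList (c :: r) v = posList r (v + 1) by simp [posList, hp],
            show zeroList (c :: r) v = zeroList r (v + 1) by simp [zeroList, hc],
            show go v (some g) (c :: r) = go (v + 1) (some g) r by simp [go, hp]]
        exact lemmaB2 r (v + 1) lo gaps pre g mid hpre hlo (by omega)
          (fun z hz => by have := hmid z hz; omega)
termination_by l => (l.length, 0)
end

-- ===== VERDICT (by name: the statement is the Claim_ definition above) =====
theorem find_gaps_spec : Claim_equal_find_gaps := by
  intro coverage _
  unfold Spec_find_gaps
  have hA := lemmaA coverage 0 [] false 0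
  have hB := lemmaB1 coverage 1 0 [] [] (by simp) (by omega)
  simp only [List.nil_append] at hA hB
  calc find_gaps coverage
      = finA (find_gaps_loop coverage 0 [] false 0) := rfl
    _ = go 1 none coverage := by simpa using hA
    _ = finB ((posList coverage 1).foldl bStep ([], 0, zeroList coverage 1)) := hB.symm
    _ = find_gaps_alt coverage := rfl
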